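-- pv_equiv track=rewrite | github.com/TheBehst/Prob1_GEI723 | GEI723/Main.py | delay_maker2
-- ===== SOURCE A (Python) =====
-- def delay_maker2(x1, x2, x3, x4, N):
--     if N < 6 or N % 2 != 0:
--         raise ValueError("N must be an even number greater than or equal to 6")
--
--     list1 = [0] * N
--     list2 = [0] * N
--
--     for i in range(1, N, 4):
--         list1[i] = x2
--     for i in range(2, N, 4):
--         list1[i] = x1
--
--     for i in range(1, N, 4):
--         list2[i] = x4
--     for i in range(2, N, 4):
--         list2[i] = x3
--
--     return list1, list2
-- ===== SOURCE B (Python) =====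
-- def delay_maker2(x1, x2, x3, x4, N):
--     if N < 6 or N % 2 != 0:
--         raise ValueError("N must be an even number greater than or equal to 6")
--     table1 = [0, x2, x1, 0]
--     table2 = [0, x4, x3, 0]
--     list1 = [table1[i % 4] for i in range(N)]
--     list2 = [table2[i % 4] for i in range(N)]
--     return list1, list2
-- ===== Notes on version B (the rewrite author's own statement) =====
-- stated objective: simpler
-- what changed: Replaces A's four strided in-place assignment loops over two preallocated zero lists with one linear comprehension per list that dispatches on i % 4 through a 4-entry lookup table.
import Mathlib
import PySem

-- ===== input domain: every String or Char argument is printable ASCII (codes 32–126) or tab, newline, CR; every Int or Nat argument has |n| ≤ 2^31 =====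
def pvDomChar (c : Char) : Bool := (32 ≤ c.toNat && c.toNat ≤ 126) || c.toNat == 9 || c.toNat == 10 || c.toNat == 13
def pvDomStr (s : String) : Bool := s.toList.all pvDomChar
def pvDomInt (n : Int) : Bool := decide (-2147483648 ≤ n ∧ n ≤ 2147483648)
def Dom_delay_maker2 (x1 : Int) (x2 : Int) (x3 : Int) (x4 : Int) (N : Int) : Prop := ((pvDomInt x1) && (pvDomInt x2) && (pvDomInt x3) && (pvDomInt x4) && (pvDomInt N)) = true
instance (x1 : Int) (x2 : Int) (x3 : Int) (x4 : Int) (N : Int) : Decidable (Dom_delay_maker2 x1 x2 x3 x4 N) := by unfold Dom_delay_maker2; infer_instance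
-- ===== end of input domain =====

-- B builds each list in one comprehension dispatching on i % 4 through a 4-entry table,
-- instead of A's four strided assignment loops over preallocated zero lists (objective: simpler).

-- ===== PORT A =====
-- A: list1 = [0]*N; list2 = [0]*N; four strided for-loops assigning in place.
-- Python lists are mutable arrays: ported as Array with in-place writes (setIfInBounds;
-- every assigned index i ∈ range(a, N, 4) satisfies 0 ≤ i < N, so it is exact here).
def delay_maker2 (x1 : Int) (x2 : Int) (x3 : Int) (x4 : Int) (N : Int) : List Int × List Int :=
  let list1 : Array Int := Array.replicate N.toNat 0
  let list2 : Array Int := Array.replicate N.toNat 0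
  let list1 := (PySem.List.pyRange 1 N 4).foldl (fun a i => a.setIfInBounds i.toNat x2) list1
  let list1 := (PySem.List.pyRange 2 N 4).foldl (fun a i => a.setIfInBounds i.toNat x1) list1
  let list2 := (PySem.List.pyRange 1 N 4).foldl (fun a i => a.setIfInBounds i.toNat x4) list2
  let list2 := (PySem.List.pyRange 2 N 4).foldl (fun a i => a.setIfInBounds i.toNat x3) list2
  (list1.toList, list2.toList)

-- ===== PORT B =====
-- B: [table[i % 4] for i in range(N)] for each of the two tables.
def delay_maker2_alt (x1 : Int) (x2 : Int) (x3 : Int) (x4 : Int) (N : Int) : List Int × List Int :=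
  let table1 : List Int := [0, x2, x1, 0]
  let table2 : List Int := [0, x4, x3, 0]
  ((PySem.List.pyRange 0 N 1).map (fun i => PySem.List.pyGetD table1 (PySem.Int.mod i 4) 0),
   (PySem.List.pyRange 0 N 1).map (fun i => PySem.List.pyGetD table2 (PySem.Int.mod i 4) 0))

-- ===== PRECONDITION & SPEC =====
-- Pre_ excludes exactly the inputs on which A raises ValueError (N < 6 or N odd).
def Pre_delay_maker2 (x1 : Int) (x2 : Int) (x3 : Int) (x4 : Int) (N : Int) : Prop :=
  6 ≤ N ∧ N % 2 = 0
instance (x1 : Int) (x2 : Int) (x3 : Int) (x4 : Int) (N : Int) : Decidable (Pre_delay_maker2 x1 x2 x3 x4 N) := by unfold Pre_delay_maker2; infer_instance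
def pvWitness_delay_maker2 : Int × Int × Int × Int × Int := (5, 7, -3, 11, 8)
def Spec_delay_maker2 (x1 : Int) (x2 : Int) (x3 : Int) (x4 : Int) (N : Int) (out : List Int × List Int) : Prop := out = delay_maker2_alt x1 x2 x3 x4 N
instance (x1 : Int) (x2 : Int) (x3 : Int) (x4 : Int) (N : Int) (out : List Int × List Int) : Decidable (Spec_delay_maker2 x1 x2 x3 x4 N out) := by unfold Spec_delay_maker2; infer_instance

-- ===== CLAIM (what is proved, stated in full; the proofs are below) =====
def Claim_equal_delay_maker2 : Prop := ∀ (x1 : Int) (x2 : Int) (x3 : Int) (x4 : Int) (N : Int), Dom_delay_maker2 x1 x2 x3 x4 N → Pre_delay_maker2 x1 x2 x3 x4 N → Spec_delay_maker2 x1 x2 x3 x4 N (delay_maker2 x1 x2 x3 x4 N)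

-- ===== LEMMAS AND PROOFS =====

-- pushing `toList` through the fold of in-place writes
theorem pv_toList_foldl (x : Int) (is : List Int) : ∀ (arr : Array Int),
    (is.foldl (fun a i => a.setIfInBounds i.toNat x) arr).toList =
      is.foldl (fun l i => l.set i.toNat x) arr.toList := by
  induction is with
  | nil => intro arr; rfl
  | cons i is ih =>
      intro arr
      simp only [List.foldl_cons, ih, Array.toList_setIfInBounds]

-- folding `·.set i.toNat x` over a list of indices preserves length
theorem pv_foldl_set_length (x : Int) (is : List Int) : ∀ (l : List Int),
    (is.foldl (fun l i => l.set i.toNat x) l).length = l.length := by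
  induction is with
  | nil => intro l; rfl
  | cons i is ih =>
      intro l
      simp only [List.foldl_cons, ih, List.length_set]

-- element-wise characterisation of the strided assignment fold
theorem pv_foldl_set_getD (x : Int) (is : List Int) : ∀ (l : List Int) (j : Nat),
    (∀ i ∈ is, 0 ≤ i ∧ i < (l.length : Int)) →
    (is.foldl (fun l i => l.set i.toNat x) l).getD j 0 =
      if (j : Int) ∈ is then x else l.getD j 0 := by
  induction is with
  | nil => intro l j _; simp
  | cons i is ih =>
      intro l j hb
      have hi := hb i (List.mem_cons_self ..)
      have hb' : ∀ k ∈ is, 0 ≤ k ∧ k < ((l.set i.toNat x).length : Int) := by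
        intro k hk
        simpa [List.length_set] using hb k (List.mem_cons_of_mem _ hk)
      simp only [List.foldl_cons, ih _ j hb']
      by_cases hjs : (j : Int) ∈ is
      · simp [hjs]
      · by_cases hji : (j : Int) = i
        · have hjn : i.toNat = j := by omega
          have hjl : j < l.length := by omega
          simp [hji, hjn, List.getD_eq_getElem?_getD, hjl]
        · have hjn : i.toNat ≠ j := by omega
          simp [hjs, hji, List.getD_eq_getElem?_getD, List.getElem?_set_ne hjn]

-- the common shape of both result lists: strided assignments = modulo-table comprehension
theorem pv_list_eq (xA xB : Int) (N : Int) (h6 : 6 ≤ N) :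
    ((PySem.List.pyRange 2 N 4).foldl (fun a i => a.setIfInBounds i.toNat xA)
      ((PySem.List.pyRange 1 N 4).foldl (fun a i => a.setIfInBounds i.toNat xB)
        (Array.replicate N.toNat 0))).toList
    = (PySem.List.pyRange 0 N 1).map
        (fun i => PySem.List.pyGetD [0, xB, xA, 0] (PySem.Int.mod i 4) 0) := by
  have h4 : (0:Int) < 4 := by norm_num
  rw [pv_toList_foldl, pv_toList_foldl, Array.toList_replicate]
  have hlen1 : ((PySem.List.pyRange 1 N 4).foldl (fun l i => l.set i.toNat xB)
      (List.replicate N.toNat (0:Int))).length = N.toNat := by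
    rw [pv_foldl_set_length]; simp
  apply List.ext_getElem
  · rw [pv_foldl_set_length, hlen1]
    simp [PySem.List.length_pyRange_one]
  · intro j hj1 hj2
    have hjN : j < N.toNat := by rw [pv_foldl_set_length, hlen1] at hj1; exact hj1
    have hb1 : ∀ i ∈ PySem.List.pyRange 1 N 4,
        0 ≤ i ∧ i < ((List.replicate N.toNat (0:Int)).length : Int) := by
      intro i hi
      rw [PySem.List.mem_pyRange_iff_of_pos h4] at hi
      refine ⟨by omega, ?_⟩
      simp only [List.length_replicate]
      omega
    have hb2 : ∀ i ∈ PySem.List.pyRange 2 N 4,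
        0 ≤ i ∧ i < (((PySem.List.pyRange 1 N 4).foldl (fun l i => l.set i.toNat xB)
          (List.replicate N.toNat (0:Int))).length : Int) := by
      intro i hi
      rw [PySem.List.mem_pyRange_iff_of_pos h4] at hi
      refine ⟨by omega, ?_⟩
      rw [hlen1]; omega
    rw [← List.getD_eq_getElem _ 0 hj1, pv_foldl_set_getD _ _ _ _ hb2,
        pv_foldl_set_getD _ _ _ _ hb1]
    have hR2 : ((j:Int) ∈ PySem.List.pyRange 2 N 4) ↔ (j:Int) % 4 = 2 := by
      rw [PySem.List.mem_pyRange_iff_of_pos h4]; omega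
    have hR1 : ((j:Int) ∈ PySem.List.pyRange 1 N 4) ↔ (j:Int) % 4 = 1 := by
      rw [PySem.List.mem_pyRange_iff_of_pos h4]; omega
    have hrhs : ((PySem.List.pyRange 0 N 1).map
        (fun i => PySem.List.pyGetD [0, xB, xA, 0] (PySem.Int.mod i 4) 0))[j]'hj2
        = PySem.List.pyGetD [0, xB, xA, 0] (PySem.Int.mod ((j:Int)) 4) 0 := by
      rw [List.getElem_map]
      congr 1
      simp [PySem.List.pyRange_one]
    rw [hrhs, PySem.Int.mod_eq_emod_of_pos h4]
    have : (j:Int) % 4 = 0 ∨ (j:Int) % 4 = 1 ∨ (j:Int) % 4 = 2 ∨ (j:Int) % 4 = 3 := by omega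
    rcases this with h | h | h | h <;>
      simp [hR1, hR2, h, PySem.List.pyGetD, PySem.List.pyGet?, PySem.List.pyIdx?]

theorem delay_maker2_spec : Claim_equal_delay_maker2 := by
  intro x1 x2 x3 x4 N _ hpre
  unfold Spec_delay_maker2 delay_maker2 delay_maker2_alt
  exact Prod.ext (pv_list_eq x1 x2 N hpre.1) (pv_list_eq x3 x4 N hpre.1)
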